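-- pv_equiv track=rewrite | github.com/cracklings3d/precision-squad | src/precision_squad/publishing.py | _finding_matches_reason_codes
-- ===== SOURCE A (Python) =====
-- def _finding_matches_reason_codes(
--     finding: dict[str, str], reason_codes: set[str]
-- ) -> bool:
--     rule_id = finding.get("rule_id", "")
--     if rule_id in reason_codes:
--         return True
--
--     umbrella_mapping = {
--         "docs_setup_prerequisites_ambiguous": {
--             "docs_setup_prerequisite_manual_only",
--             "docs_setup_prerequisite_version_pinned",
--             "docs_setup_prerequisite_source_unambiguous",
--             "docs_setup_prerequisite_verification_present",
--             "docs_environment_assumptions_explicit",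
--             "docs_environment_mutation_verification_present",
--         },
--         "docs_contract_incomplete": {
--             "docs_setup_command_present",
--             "docs_qa_command_present",
--             "docs_commands_explained",
--         },
--     }
--     return any(
--         code in reason_codes and rule_id in mapped_rule_ids
--         for code, mapped_rule_ids in umbrella_mapping.items()
--     )
-- ===== SOURCE B (Python) =====
-- def _finding_matches_reason_codes(
--     finding: dict[str, str], reason_codes: set[str]
-- ) -> bool:
--     # Transposed mapping: each concrete rule_id points to the single umbrella
--     # code that expands to it (the umbrella sets are disjoint, so this is a
--     # faithful inversion of the original umbrella_mapping).
--     umbrella_of = {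
--         "docs_setup_prerequisite_manual_only": "docs_setup_prerequisites_ambiguous",
--         "docs_setup_prerequisite_version_pinned": "docs_setup_prerequisites_ambiguous",
--         "docs_setup_prerequisite_source_unambiguous": "docs_setup_prerequisites_ambiguous",
--         "docs_setup_prerequisite_verification_present": "docs_setup_prerequisites_ambiguous",
--         "docs_environment_assumptions_explicit": "docs_setup_prerequisites_ambiguous",
--         "docs_environment_mutation_verification_present": "docs_setup_prerequisites_ambiguous",
--         "docs_setup_command_present": "docs_contract_incomplete",
--         "docs_qa_command_present": "docs_contract_incomplete",
--         "docs_commands_explained": "docs_contract_incomplete",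
--     }
--     rule_id = finding.get("rule_id", "")
--     if rule_id in reason_codes:
--         return True
--     umbrella = umbrella_of.get(rule_id)
--     return umbrella is not None and umbrella in reason_codes
-- ===== Notes on version B (the rewrite author's own statement) =====
-- stated objective: simpler
-- what changed: B replaces A's scan over umbrella_mapping.items() (testing both the code against reason_codes and rule_id against each mapped set) with the transposed data structure: a child-to-umbrella dict, so the answer is one lookup of rule_id followed by one membership test of the resulting umbrella code.
import Mathlib
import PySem

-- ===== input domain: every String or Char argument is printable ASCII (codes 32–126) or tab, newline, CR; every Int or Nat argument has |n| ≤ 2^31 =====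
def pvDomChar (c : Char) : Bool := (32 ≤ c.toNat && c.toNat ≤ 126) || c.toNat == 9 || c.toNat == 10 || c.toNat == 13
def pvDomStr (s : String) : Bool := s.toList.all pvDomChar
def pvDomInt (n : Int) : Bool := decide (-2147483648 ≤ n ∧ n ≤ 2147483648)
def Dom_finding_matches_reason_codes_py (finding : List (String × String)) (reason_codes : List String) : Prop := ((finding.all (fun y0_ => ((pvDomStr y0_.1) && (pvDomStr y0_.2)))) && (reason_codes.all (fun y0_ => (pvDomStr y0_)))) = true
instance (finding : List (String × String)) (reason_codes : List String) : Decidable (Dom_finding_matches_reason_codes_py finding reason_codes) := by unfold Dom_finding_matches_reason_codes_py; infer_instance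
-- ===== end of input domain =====

-- B replaces A's scan over the umbrella mapping's items with the transposed child-to-umbrella dict: one lookup of rule_id, then one membership test; objective: simpler, same cost.


-- ===== PORT A =====
-- umbrella_mapping as an association list in insertion order (dict values are Python sets)
def pvUmbrellaA : PySem.Dict String (PySem.Set String) :=
  PySem.Dict.mk [("docs_setup_prerequisites_ambiguous",
     ["docs_setup_prerequisite_manual_only",
      "docs_setup_prerequisite_version_pinned",
      "docs_setup_prerequisite_source_unambiguous",
      "docs_setup_prerequisite_verification_present",
      "docs_environment_assumptions_explicit",
      "docs_environment_mutation_verification_present"]),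
   ("docs_contract_incomplete",
     ["docs_setup_command_present",
      "docs_qa_command_present",
      "docs_commands_explained"])]

def finding_matches_reason_codes_py (finding : List (String × String)) (reason_codes : List String) : Bool :=
  let rule_id := PySem.Dict.getD (PySem.Dict.mk finding) "rule_id" ""
  if PySem.Set.contains reason_codes rule_id then true
  else
    (PySem.Dict.items pvUmbrellaA).any
      (fun p => PySem.Set.contains reason_codes p.1 && PySem.Set.contains p.2 rule_id)

-- ===== PORT B =====
-- the transposed mapping: each concrete rule_id to its (unique) umbrella code
def pvUmbrellaOf : PySem.Dict String String :=
  PySem.Dict.mk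
    [("docs_setup_prerequisite_manual_only", "docs_setup_prerequisites_ambiguous"),
     ("docs_setup_prerequisite_version_pinned", "docs_setup_prerequisites_ambiguous"),
     ("docs_setup_prerequisite_source_unambiguous", "docs_setup_prerequisites_ambiguous"),
     ("docs_setup_prerequisite_verification_present", "docs_setup_prerequisites_ambiguous"),
     ("docs_environment_assumptions_explicit", "docs_setup_prerequisites_ambiguous"),
     ("docs_environment_mutation_verification_present", "docs_setup_prerequisites_ambiguous"),
     ("docs_setup_command_present", "docs_contract_incomplete"),
     ("docs_qa_command_present", "docs_contract_incomplete"),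
     ("docs_commands_explained", "docs_contract_incomplete")]

def finding_matches_reason_codes_py_alt (finding : List (String × String)) (reason_codes : List String) : Bool :=
  let rule_id := PySem.Dict.getD (PySem.Dict.mk finding) "rule_id" ""
  if PySem.Set.contains reason_codes rule_id then true
  else
    match PySem.Dict.get? pvUmbrellaOf rule_id with
    | none => false
    | some umbrella => PySem.Set.contains reason_codes umbrella

-- ===== PRECONDITION & SPEC =====
def Spec_finding_matches_reason_codes_py (finding : List (String × String)) (reason_codes : List String) (out : Bool) : Prop := out = finding_matches_reason_codes_py_alt finding reason_codes
instance (finding : List (String × String)) (reason_codes : List String) (out : Bool) : Decidable (Spec_finding_matches_reason_codes_py finding reason_codes out) := by unfold Spec_finding_matches_reason_codes_py; infer_instance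

-- ===== CLAIM (what is proved, stated in full; the proofs are below) =====
def Claim_equal_finding_matches_reason_codes_py : Prop := ∀ (finding : List (String × String)) (reason_codes : List String), Dom_finding_matches_reason_codes_py finding reason_codes → Spec_finding_matches_reason_codes_py finding reason_codes (finding_matches_reason_codes_py finding reason_codes)

-- ===== LEMMAS AND PROOFS =====

-- A's scan over the two umbrella entries equals B's transposed lookup, for every rule_id x
lemma scan_eq_transposed_lookup (rc : List String) (x : String) :
    ((PySem.Dict.items pvUmbrellaA).any
        (fun p => PySem.Set.contains rc p.1 && PySem.Set.contains p.2 x))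
    = (match PySem.Dict.get? pvUmbrellaOf x with
       | none => false
       | some umbrella => PySem.Set.contains rc umbrella) := by
  simp only [pvUmbrellaOf, PySem.Dict.get?_mk_cons]
  split_ifs with h1 h2 h3 h4 h5 h6 h7 h8 h9 <;>
    simp only [beq_iff_eq] at * <;>
    try subst_eqs
  all_goals
    first
      | (simp [pvUmbrellaA, PySem.Dict.get?, Ne.symm h1, Ne.symm h2, Ne.symm h3,
           Ne.symm h4, Ne.symm h5, Ne.symm h6, Ne.symm h7, Ne.symm h8, Ne.symm h9]; done)
      | (simp [pvUmbrellaA]; done)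

-- ===== VERDICT (by name: the statement is the Claim_ definition above) =====
theorem finding_matches_reason_codes_py_spec : Claim_equal_finding_matches_reason_codes_py := by
  intro finding rc _
  unfold Spec_finding_matches_reason_codes_py
  unfold finding_matches_reason_codes_py finding_matches_reason_codes_py_alt
  simp only [scan_eq_transposed_lookup]
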